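-- pv_equiv track=rewrite | github.com/Leonardo-Russo/Roulette-Analyzer | Bot/library.py | dozencheck
-- ===== SOURCE A (Python) =====
-- def dozencheck(history):
--
--     flag = 0
--
--     for i in history:
--         if i <= 12:
--             flag = -1
--             break
--
--     if flag == 0:
--         flag = 1
--
--     if flag != 1:
--         for i in history:
--             if i <= 24 and i >= 13:
--                 flag = -2
--                 break
--
--     if flag == -1:
--         flag = 2
--
--     if flag != 1 and flag != 2:
--         for i in history:
--             if i >= 25:
--                 flag = -3
--
--     if flag == -2:
--         flag = 3
--
--     if flag == -1 or flag == -2 or flag == -3: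
--         flag = 0
--
--     return flag
-- ===== SOURCE B (Python) =====
-- def dozencheck(history):
--     lo = mid = hi = False
--     for i in history:
--         if i <= 12:
--             lo = True
--         elif i <= 24:
--             mid = True
--         else:
--             hi = True
--     return 1 if not lo else 2 if not mid else 3 if not hi else 0
-- ===== Notes on version B (the rewrite author's own statement) =====
-- stated objective: simpler
-- what changed: Replaces A's three staged scans with flag state machine by a single pass that classifies each element into its dozen once, accumulating three seen-flags, and computes the result from the flags at the end.
import Mathlib
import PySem

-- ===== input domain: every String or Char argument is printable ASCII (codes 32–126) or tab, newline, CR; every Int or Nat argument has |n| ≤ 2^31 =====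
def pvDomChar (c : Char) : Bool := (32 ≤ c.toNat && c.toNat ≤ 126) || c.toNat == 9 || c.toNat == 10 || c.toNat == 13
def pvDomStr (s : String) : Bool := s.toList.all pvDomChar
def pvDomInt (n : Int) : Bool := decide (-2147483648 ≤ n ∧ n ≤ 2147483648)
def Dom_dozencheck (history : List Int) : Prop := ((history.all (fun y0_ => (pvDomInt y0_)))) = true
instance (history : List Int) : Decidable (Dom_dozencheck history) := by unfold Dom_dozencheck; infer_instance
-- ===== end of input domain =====

-- ===== PORT A =====
-- B replaces A's three staged scans + flag state machine by ONE pass that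
-- classifies each element into its dozen and accumulates three seen-flags (simpler).

-- first loop: `for i in history: if i <= 12: flag = -1; break` (flag starts 0)
def pvA_loop1 : List Int → Int
  | [] => 0
  | i :: t => if i ≤ 12 then -1 else pvA_loop1 t

-- second loop: sets flag to -2 on the first i with 13 ≤ i ≤ 24, starting from flag
def pvA_loop2 (flag : Int) : List Int → Int
  | [] => flag
  | i :: t => if i ≤ 24 ∧ 13 ≤ i then -2 else pvA_loop2 flag t

-- third loop: no break; sets flag to -3 whenever i ≥ 25
def pvA_loop3 (flag : Int) : List Int → Int
  | [] => flag
  | i :: t => pvA_loop3 (if 25 ≤ i then -3 else flag) t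

def dozencheck (history : List Int) : Int :=
  let flag : Int := 0
  let flag := pvA_loop1 history
  let flag := if flag = 0 then 1 else flag
  let flag := if flag ≠ 1 then pvA_loop2 flag history else flag
  let flag := if flag = -1 then 2 else flag
  let flag := if flag ≠ 1 ∧ flag ≠ 2 then pvA_loop3 flag history else flag
  let flag := if flag = -2 then 3 else flag
  if flag = -1 ∨ flag = -2 ∨ flag = -3 then 0 else flag

-- ===== PORT B =====
-- single pass: each element updates exactly one of the three seen-flags
def pvB_scan : Bool × Bool × Bool → List Int → Bool × Bool × Bool
  | s, [] => s
  | (lo, mid, hi), i :: t =>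
    pvB_scan (if i ≤ 12 then (true, mid, hi)
              else if i ≤ 24 then (lo, true, hi)
              else (lo, mid, true)) t

def dozencheck_alt (history : List Int) : Int :=
  match pvB_scan (false, false, false) history with
  | (lo, mid, hi) => if ¬lo then 1 else if ¬mid then 2 else if ¬hi then 3 else 0

-- ===== PRECONDITION & SPEC =====
def Spec_dozencheck (history : List Int) (out : Int) : Prop := out = dozencheck_alt history
instance (history : List Int) (out : Int) : Decidable (Spec_dozencheck history out) := by unfold Spec_dozencheck; infer_instance

-- ===== CLAIM (what is proved, stated in full; the proofs are below) =====
def Claim_equal_dozencheck : Prop := ∀ (history : List Int), Dom_dozencheck history → Spec_dozencheck history (dozencheck history)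

-- ===== LEMMAS AND PROOFS =====
theorem pvA_loop1_eq (h : List Int) :
    pvA_loop1 h = if h.any (fun i => decide (i ≤ 12)) then -1 else 0 := by
  induction h with
  | nil => simp [pvA_loop1]
  | cons i t ih => by_cases hi : i ≤ 12 <;> simp [pvA_loop1, hi, ih]

theorem pvA_loop2_eq (f : Int) (h : List Int) :
    pvA_loop2 f h = if h.any (fun i => decide (13 ≤ i ∧ i ≤ 24)) then -2 else f := by
  induction h with
  | nil => simp [pvA_loop2]
  | cons i t ih =>
    by_cases hi : i ≤ 24 ∧ 13 ≤ i
    · simp [pvA_loop2, hi, hi.1, hi.2]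
    · have : ¬ (13 ≤ i ∧ i ≤ 24) := fun h2 => hi ⟨h2.2, h2.1⟩
      simp [pvA_loop2, hi, this, ih]

theorem pvA_loop3_eq (f : Int) (h : List Int) :
    pvA_loop3 f h = if h.any (fun i => decide (25 ≤ i)) then -3 else f := by
  induction h generalizing f with
  | nil => simp [pvA_loop3]
  | cons i t ih => by_cases hi : 25 ≤ i <;> simp [pvA_loop3, hi, ih]

-- the single pass computes exactly (seen lo, seen mid, seen hi), disjoined with the start state
theorem pvB_scan_eq (lo mid hi : Bool) (h : List Int) :
    pvB_scan (lo, mid, hi) h =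
      (lo || h.any (fun i => decide (i ≤ 12)),
       mid || h.any (fun i => decide (13 ≤ i ∧ i ≤ 24)),
       hi || h.any (fun i => decide (25 ≤ i))) := by
  induction h generalizing lo mid hi with
  | nil => simp [pvB_scan]
  | cons i t ih =>
    by_cases h1 : i ≤ 12
    · have h2 : ¬ (13 ≤ i) := by omega
      have h3 : ¬ (25 ≤ i) := by omega
      simp [pvB_scan, h1, h2, h3, ih]
    · by_cases h2 : i ≤ 24
      · have h2a : 13 ≤ i := by omega
        have h3 : ¬ (25 ≤ i) := by omega
        simp [pvB_scan, h1, h2, h2a, h3, ih]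
      · have h3 : 25 ≤ i := by omega
        have h2a : ¬ (i ≤ 24) := by omega
        simp [pvB_scan, h1, h2a, h3, ih]

-- ===== VERDICT (by name: the statement is the Claim_ definition above) =====
theorem dozencheck_spec : Claim_equal_dozencheck := by
  intro history _
  unfold Spec_dozencheck dozencheck dozencheck_alt
  simp only [pvA_loop1_eq, pvA_loop2_eq, pvA_loop3_eq, pvB_scan_eq]
  cases h1 : history.any (fun i => decide (i ≤ 12)) <;>
    cases h2 : history.any (fun i => decide (13 ≤ i ∧ i ≤ 24)) <;>
      cases h3 : history.any (fun i => decide (25 ≤ i)) <;>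
        simp [h1, h2, h3]
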